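-- pv_equiv track=rewrite | github.com/Cha-Young-Ho/mcper | app/services/mcp_host_validate.py | origin_header_allowed
-- ===== SOURCE A (Python) =====
-- def origin_header_allowed(origin: str | None, allowed_origins: list[str]) -> bool:
--     """Origin 이 없으면 통과. allowed_origins 가 비어 있으면 Origin 제한 없음."""
--     if not origin:
--         return True
--     if not allowed_origins:
--         return True
--     if origin in allowed_origins:
--         return True
--     for allowed in allowed_origins:
--         if allowed.endswith(":*"):
--             base = allowed[:-2]
--             if origin.startswith(base + ":"):
--                 return True
--     return False
-- ===== SOURCE B (Python) =====
-- def origin_header_allowed(origin, allowed_origins):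
--     if not origin or not allowed_origins:
--         return True
--     # Build a hash index once: the exact origins and the bases of ':*' wildcards.
--     exact = set()
--     bases = set()
--     for a in allowed_origins:
--         exact.add(a)
--         if a.endswith(":*"):
--             bases.add(a[:-2])
--     if origin in exact:
--         return True
--     # Scan the origin's ':' positions and look each candidate base up in the index.
--     return any(origin[:i] in bases for i, ch in enumerate(origin) if ch == ":")
-- ===== Notes on version B (the rewrite author's own statement) =====
-- stated objective: alternative
-- what changed: B builds a hash index over allowed_origins once (a set of exact entries and a set of ':*' wildcard bases) and then scans the ORIGIN string's ':' positions, looking each prefix up in the index, instead of A's scans over the allowed list testing each pattern against the origin.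
import Mathlib
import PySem

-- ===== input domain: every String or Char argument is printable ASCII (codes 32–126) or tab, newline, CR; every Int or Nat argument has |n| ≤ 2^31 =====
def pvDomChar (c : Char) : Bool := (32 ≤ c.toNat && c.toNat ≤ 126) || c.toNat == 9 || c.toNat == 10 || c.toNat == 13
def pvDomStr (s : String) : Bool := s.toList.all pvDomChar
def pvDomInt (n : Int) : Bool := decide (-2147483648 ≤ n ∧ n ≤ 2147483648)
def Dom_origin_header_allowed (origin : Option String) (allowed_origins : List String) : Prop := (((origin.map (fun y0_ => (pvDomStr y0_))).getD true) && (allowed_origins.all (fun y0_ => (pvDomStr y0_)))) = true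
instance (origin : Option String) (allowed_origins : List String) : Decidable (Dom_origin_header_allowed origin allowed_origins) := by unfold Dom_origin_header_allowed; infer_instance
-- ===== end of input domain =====

-- B indexes allowed_origins once into two hash sets (exact entries, ':*' wildcard bases)
-- and then scans the origin's ':' positions with set lookups, instead of A's scans over
-- the allowed list testing each pattern against the origin; objective: alternative.


-- ===== PORT A =====
-- the 'for allowed in allowed_origins:' wildcard loop of A
def pvAWildLoop (o : List Char) : List String → Bool
  | [] => false
  | a :: rest =>
    if PySem.Chars.endswith a.toList [':', '*'] then
      let base := PySem.Chars.slice a.toList none (some (-2))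
      if PySem.Chars.startswith o (base ++ [':']) then true
      else pvAWildLoop o rest
    else pvAWildLoop o rest

def origin_header_allowed (origin : Option String) (allowed_origins : List String) : Bool :=
  match origin with
  | none => true
  | some s =>
    if s = "" then true
    else if allowed_origins = [] then true
    else if allowed_origins.contains s then true
    else pvAWildLoop s.toList allowed_origins

-- ===== PORT B =====
-- Source B's indexing loop: one pass over allowed_origins building (exact set, wildcard-base set)
def pvIndex (l : List String) : PySem.Set String × PySem.Set (List Char) :=
  l.foldl (fun st a =>
    (PySem.Set.add st.1 a,
     if PySem.Chars.endswith a.toList [':', '*'] then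
       PySem.Set.add st.2 (PySem.Chars.slice a.toList none (some (-2)))
     else st.2))
    (PySem.Set.empty, PySem.Set.empty)

def origin_header_allowed_alt (origin : Option String) (allowed_origins : List String) : Bool :=
  match origin with
  | none => true
  | some s =>
    if s = "" || allowed_origins = [] then true
    else
      let idx := pvIndex allowed_origins
      if PySem.Set.contains idx.1 s then true
      else
        -- any(origin[:i] in bases for i, ch in enumerate(origin) if ch == ":")
        (PySem.List.enumerate s.toList 0).any (fun p =>
          p.2 == ':' && PySem.Set.contains idx.2 (PySem.List.slice s.toList none (some p.1)))

-- ===== PRECONDITION & SPEC =====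
def Spec_origin_header_allowed (origin : Option String) (allowed_origins : List String) (out : Bool) : Prop := out = origin_header_allowed_alt origin allowed_origins
instance (origin : Option String) (allowed_origins : List String) (out : Bool) : Decidable (Spec_origin_header_allowed origin allowed_origins out) := by unfold Spec_origin_header_allowed; infer_instance

-- ===== CLAIM (what is proved, stated in full; the proofs are below) =====
def Claim_equal_origin_header_allowed : Prop := ∀ (origin : Option String) (allowed_origins : List String), Dom_origin_header_allowed origin allowed_origins → Spec_origin_header_allowed origin allowed_origins (origin_header_allowed origin allowed_origins)

-- ===== LEMMAS AND PROOFS =====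

-- membership in the two index components, with a generalized accumulator
theorem pv_mem_index_aux (l : List String) (st : PySem.Set String × PySem.Set (List Char))
    (x : String) (y : List Char) :
    (x ∈ (l.foldl (fun st a =>
      (PySem.Set.add st.1 a,
       if PySem.Chars.endswith a.toList [':', '*'] then
         PySem.Set.add st.2 (PySem.Chars.slice a.toList none (some (-2)))
       else st.2)) st).1 ↔ x ∈ st.1 ∨ x ∈ l) ∧
    (y ∈ (l.foldl (fun st a =>
      (PySem.Set.add st.1 a,
       if PySem.Chars.endswith a.toList [':', '*'] then
         PySem.Set.add st.2 (PySem.Chars.slice a.toList none (some (-2)))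
       else st.2)) st).2 ↔ y ∈ st.2 ∨
        ∃ a ∈ l, PySem.Chars.endswith a.toList [':', '*'] = true ∧
          y = PySem.Chars.slice a.toList none (some (-2))) := by
  induction l generalizing st with
  | nil => simp
  | cons a rest ih =>
    simp only [List.foldl_cons]
    constructor
    · rw [(ih _).1]
      simp [PySem.Set.mem_add]
      tauto
    · rw [(ih _).2]
      by_cases hw : PySem.Chars.endswith a.toList [':', '*'] = true <;>
        simp [hw, PySem.Set.mem_add] <;> tauto

-- A's wildcard loop as an existential over the list
theorem pv_awildloop_iff (o : List Char) (l : List String) :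
    pvAWildLoop o l = true ↔ ∃ a ∈ l, PySem.Chars.endswith a.toList [':', '*'] = true ∧
      PySem.Chars.startswith o (PySem.Chars.slice a.toList none (some (-2)) ++ [':']) = true := by
  induction l with
  | nil => simp [pvAWildLoop]
  | cons a rest ih =>
    by_cases hw : PySem.Chars.endswith a.toList [':', '*'] = true <;>
      by_cases hs : PySem.Chars.startswith o (PySem.Chars.slice a.toList none (some (-2)) ++ [':']) = true <;>
      simp [pvAWildLoop, hw, hs, ih]

-- startswith o (b ++ [':']) holds iff some ':' position k of o has o.take k = b
theorem pv_startswith_colon_iff (o b : List Char) :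
    PySem.Chars.startswith o (b ++ [':']) = true ↔
      ∃ k : Nat, ∃ h : k < o.length, o[k] = ':' ∧ o.take k = b := by
  rw [PySem.Chars.startswith_iff]
  constructor
  · intro hp
    have hlen : b.length + 1 ≤ o.length := by
      have := hp.length_le; simpa using this
    have h1 : b ++ [':'] = o.take (b.length + 1) := by
      have := List.prefix_iff_eq_take.mp hp
      simpa using this
    rw [List.take_add_one, List.getElem?_eq_getElem (by omega)] at h1
    have h2 := List.append_inj h1 (by simp [List.length_take]; omega)
    exact ⟨b.length, by omega, by simpa using h2.2.symm, h2.1.symm⟩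
  · rintro ⟨k, hk, hc, ht⟩
    have : b ++ [':'] = o.take (k + 1) := by
      rw [List.take_add_one]
      simp [ht, List.getElem?_eq_getElem hk, hc]
    rw [this]
    exact List.take_prefix _ _

-- ===== VERDICT (by name: the statement is the Claim_ definition above) =====
theorem origin_header_allowed_spec : Claim_equal_origin_header_allowed := by
  intro origin allowed_origins _
  unfold Spec_origin_header_allowed
  match origin with
  | none => rfl
  | some s =>
    by_cases hs : s = ""
    · simp [origin_header_allowed, origin_header_allowed_alt, hs]
    · by_cases hl : allowed_origins = []
      · simp [origin_header_allowed, origin_header_allowed_alt, hs, hl]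
      · -- the exact-set lookup equals A's membership test
        have hex : PySem.Set.contains (pvIndex allowed_origins).1 s = true ↔ s ∈ allowed_origins := by
          rw [PySem.Set.contains_iff]
          unfold pvIndex
          rw [(pv_mem_index_aux allowed_origins _ s []).1]
          simp [PySem.Set.empty]
        -- membership in the wildcard-base index
        have hbase : ∀ y : List Char, y ∈ (pvIndex allowed_origins).2 ↔
            ∃ a ∈ allowed_origins, PySem.Chars.endswith a.toList [':', '*'] = true ∧
              y = PySem.Chars.slice a.toList none (some (-2)) := by
          intro y
          unfold pvIndex
          rw [(pv_mem_index_aux allowed_origins _ "" y).2]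
          simp [PySem.Set.empty]
        -- A's wildcard loop equals B's scan over the origin's ':' positions
        have hwild : pvAWildLoop s.toList allowed_origins = true ↔
            ((PySem.List.enumerate s.toList 0).any (fun p =>
              p.2 == ':' && PySem.Set.contains (pvIndex allowed_origins).2
                (PySem.List.slice s.toList none (some p.1))) = true) := by
          rw [pv_awildloop_iff, List.any_eq_true]
          constructor
          · rintro ⟨a, ha, he, hst⟩
            rw [pv_startswith_colon_iff] at hst
            obtain ⟨k, hk, hc, ht⟩ := hst
            refine ⟨((k : Int), s.toList[k]), ?_, ?_⟩
            · rw [PySem.List.mem_enumerate_iff]; exact ⟨k, hk, by simp⟩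
            · simp only [hc, beq_self_eq_true, Bool.true_and, PySem.List.slice_to_natCast]
              rw [PySem.Set.contains_iff, hbase]
              exact ⟨a, ha, he, ht⟩
          · rintro ⟨p, hp, hpred⟩
            rw [PySem.List.mem_enumerate_iff] at hp
            obtain ⟨k, hk, rfl⟩ := hp
            simp only [zero_add, PySem.List.slice_to_natCast, Bool.and_eq_true, beq_iff_eq] at hpred
            obtain ⟨hc, hmem⟩ := hpred
            rw [PySem.Set.contains_iff, hbase] at hmem
            obtain ⟨a, ha, he, hb⟩ := hmem
            refine ⟨a, ha, he, ?_⟩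
            rw [pv_startswith_colon_iff]
            exact ⟨k, hk, hc, hb⟩
        by_cases hc : allowed_origins.contains s = true
        · have hm : s ∈ allowed_origins := by simpa using hc
          have hm2 : s ∈ (pvIndex allowed_origins).1 := (PySem.Set.contains_iff _ _).mp (hex.mpr hm)
          simp [origin_header_allowed, origin_header_allowed_alt, hs, hl, hm, hm2]
        · have h2 : PySem.Set.contains (pvIndex allowed_origins).1 s = false := by
            rw [Bool.eq_false_iff]
            intro h; rw [hex] at h; exact hc (by simpa using h)
          simp only [origin_header_allowed, origin_header_allowed_alt, hs, hl, hc,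
            Bool.or_self, if_false, h2]
          cases hA : pvAWildLoop s.toList allowed_origins with
          | true => exact ((hwild.mp hA).symm)
          | false =>
            cases hB : ((PySem.List.enumerate s.toList 0).any (fun p =>
              p.2 == ':' && PySem.Set.contains (pvIndex allowed_origins).2
                (PySem.List.slice s.toList none (some p.1)))) with
            | true => exact absurd (hwild.mpr hB) (by simp [hA])
            | false => rfl
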